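-- pv_equiv track=rewrite | github.com/Hydra-Bolt/Hangman | CODE/hangmanCLI.py | obscure_phrase
-- ===== SOURCE A (Python) =====
-- def obscure_phrase(secret,guessed):
--     outstr = ""
--     for i in secret:
--         if i in guessed and i not in outstr:
--             outstr+=i
--         else:
--             outstr+="_"
--     return outstr
-- ===== SOURCE B (Python) =====
-- def obscure_phrase(secret, guessed):
--     return "".join(
--         c if c in guessed and secret.find(c) == i else "_"
--         for i, c in enumerate(secret)
--     )
-- ===== Notes on version B (the rewrite author's own statement) =====
-- stated objective: idiomatic
-- what changed: Replaces the stateful loop whose growing output string doubles as the 'already revealed' tracker with a single index-driven comprehension that reveals a guessed character exactly at its first occurrence (secret.find(c) == i).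
import Mathlib
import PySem

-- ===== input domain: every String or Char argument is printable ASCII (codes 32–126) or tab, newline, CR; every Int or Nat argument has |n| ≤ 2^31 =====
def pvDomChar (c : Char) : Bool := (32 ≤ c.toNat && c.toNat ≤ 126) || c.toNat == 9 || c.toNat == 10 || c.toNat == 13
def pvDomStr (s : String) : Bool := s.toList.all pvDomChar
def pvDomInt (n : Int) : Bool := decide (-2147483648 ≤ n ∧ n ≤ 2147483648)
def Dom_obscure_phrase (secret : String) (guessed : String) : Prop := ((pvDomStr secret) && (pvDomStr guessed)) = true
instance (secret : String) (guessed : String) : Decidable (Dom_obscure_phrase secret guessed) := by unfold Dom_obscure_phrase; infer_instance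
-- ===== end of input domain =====

-- B replaces A's stateful loop (output string doubling as the seen-tracker) by an
-- index-driven comprehension revealing each guessed char only at its first occurrence;
-- same cost, plainer code.

-- ===== PORT A =====
-- 'i in guessed' / 'i not in outstr' are one-char substring tests, exactly char membership.
def obscure_phrase (secret : String) (guessed : String) : String :=
  String.ofList (secret.toList.foldl
    (fun outstr i =>
      if i ∈ guessed.toList ∧ i ∉ outstr then outstr ++ [i] else outstr ++ ['_'])
    [])

-- ===== PORT B =====
def obscure_phrase_alt (secret : String) (guessed : String) : String :=
  String.ofList ((PySem.List.enumerate secret.toList).map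
    (fun ic =>
      if ic.2 ∈ guessed.toList ∧ PySem.Str.find secret (String.ofList [ic.2]) = ic.1
      then ic.2 else '_'))

-- ===== PRECONDITION & SPEC =====
def Spec_obscure_phrase (secret : String) (guessed : String) (out : String) : Prop := out = obscure_phrase_alt secret guessed
instance (secret : String) (guessed : String) (out : String) : Decidable (Spec_obscure_phrase secret guessed out) := by unfold Spec_obscure_phrase; infer_instance

-- ===== CLAIM (what is proved, stated in full; the proofs are below) =====
def Claim_equal_obscure_phrase : Prop := ∀ (secret : String) (guessed : String), Dom_obscure_phrase secret guessed → Spec_obscure_phrase secret guessed (obscure_phrase secret guessed)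

-- ===== LEMMAS AND PROOFS =====

-- common specification: reveal c iff c guessed and not seen before
def specGo (gs : List Char) (seen : List Char) : List Char → List Char
  | [] => []
  | c :: xs => (if c ∈ gs ∧ c ∉ seen then c else '_') :: specGo gs (c :: seen) xs

lemma specGo_length (gs seen xs : List Char) : (specGo gs seen xs).length = xs.length := by
  induction xs generalizing seen with
  | nil => rfl
  | cons c xs ih => simp [specGo, ih]

lemma specGo_getElem (gs : List Char) : ∀ (xs seen : List Char) (j : Nat) (hj : j < xs.length),
    (specGo gs seen xs)[j]'(by rw [specGo_length]; exact hj) =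
      if xs[j] ∈ gs ∧ xs[j] ∉ seen ∧ xs[j] ∉ xs.take j then xs[j] else '_' := by
  intro xs
  induction xs with
  | nil => intro seen j hj; simp at hj
  | cons c xs ih =>
    intro seen j hj
    cases j with
    | zero => simp [specGo]
    | succ j =>
      have hj' : j < xs.length := by simpa using hj
      have := ih (c :: seen) j hj'
      simp only [specGo, List.getElem_cons_succ, this, List.take_succ_cons, List.mem_cons]
      by_cases h1 : xs[j] ∈ gs <;> by_cases h2 : xs[j] = c <;>
        by_cases h3 : xs[j] ∈ seen <;> by_cases h4 : xs[j] ∈ xs.take j <;>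
        simp [h1, h2, h3, h4]

lemma A_fold (gs : List Char) : ∀ (xs out seen : List Char),
    (∀ c, c ≠ '_' → (c ∈ out ↔ c ∈ gs ∧ c ∈ seen)) →
    xs.foldl (fun outstr i =>
        if i ∈ gs ∧ i ∉ outstr then outstr ++ [i] else outstr ++ ['_']) out
      = out ++ specGo gs seen xs := by
  intro xs
  induction xs with
  | nil => intro out seen _; simp [specGo]
  | cons c xs ih =>
    intro out seen hinv
    simp only [List.foldl_cons, specGo]
    have hstep : (if c ∈ gs ∧ c ∉ out then out ++ [c] else out ++ ['_'])
        = out ++ [if c ∈ gs ∧ c ∉ seen then c else '_'] := by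
      by_cases hc : c = '_'
      · subst hc; split <;> simp
      · have := hinv c hc
        by_cases h1 : c ∈ gs <;> by_cases h2 : c ∈ seen <;>
          simp [h1, h2] at this ⊢ <;> simp [this]
    rw [hstep, ih (out ++ [if c ∈ gs ∧ c ∉ seen then c else '_']) (c :: seen) ?_]
    · simp
    intro d hd
    by_cases hc : c = '_'
    · subst hc
      simp only [List.mem_append, List.mem_cons]
      constructor
      · rintro (h | h)
        · exact ((hinv d hd).1 h).imp id Or.inr
        · split at h <;> simp_all
      · rintro ⟨h1, (h2 | h2)⟩
        · exact absurd h2 hd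
        · exact Or.inl ((hinv d hd).2 ⟨h1, h2⟩)
    · have hcm := hinv c hc
      by_cases h1 : c ∈ gs <;> by_cases h2 : c ∈ seen <;>
        simp only [h1, h2, and_true, and_false, if_true, if_false,
          not_true, not_false_iff, iff_true, iff_false] at hcm ⊢ <;>
        · simp only [List.mem_append, List.mem_cons, hinv d hd]
          by_cases hdc : d = c <;> simp_all

lemma mem_take_iff (l : List Char) (c : Char) (j : Nat) :
    c ∈ l.take j ↔ ∃ (i : Nat), i < j ∧ l[i]? = some c := by
  rw [List.mem_take_iff_getElem]
  constructor
  · rintro ⟨i, hi, h⟩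
    have h1 : i < j := lt_of_lt_of_le hi (min_le_left _ _)
    have h2 : i < l.length := lt_of_lt_of_le hi (min_le_right _ _)
    exact ⟨i, h1, by simp [List.getElem?_eq_getElem h2, h]⟩
  · rintro ⟨i, hi, h⟩
    have hil : i < l.length := by
      by_contra hh
      simp [List.getElem?_eq_none (le_of_not_gt hh)] at h
    exact ⟨i, by omega, by simpa [List.getElem?_eq_getElem hil] using h⟩

lemma prefix_singleton_iff (c : Char) (t : List Char) : [c] <+: t ↔ t.head? = some c := by
  cases t with
  | nil => simp
  | cons a t => simp [List.cons_prefix_cons, eq_comm]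

lemma find_singleton_eq_iff (l : List Char) (j : Nat) (hj : j < l.length) :
    PySem.Chars.find l [l[j]] = (j : Int) ↔ l[j] ∉ l.take j := by
  have hmem : l[j] ∈ l := List.getElem_mem hj
  have hin : [l[j]] <:+: l := by
    obtain ⟨s, t, hst⟩ := List.append_of_mem hmem
    exact ⟨s, t, by simpa using hst.symm⟩
  have h0 : 0 ≤ PySem.Chars.find l [l[j]] := (PySem.Chars.find_nonneg_iff l _).mpr hin
  obtain ⟨hpre, hmin⟩ := PySem.Chars.find_spec h0
  have key : ∀ i : Nat, ([l[j]] <+: l.drop i) ↔ l[i]? = some l[j] := by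
    intro i; rw [prefix_singleton_iff, List.head?_drop]
  rw [mem_take_iff]
  constructor
  · intro hfind
    have hk : (PySem.Chars.find l [l[j]]).toNat = j := by omega
    rintro ⟨i, hij, hi⟩
    exact hmin i (by omega) ((key i).mpr hi)
  · intro hnone
    have hkj : (PySem.Chars.find l [l[j]]).toNat = j := by
      have hkey := (key _).mp hpre
      by_contra hne
      rcases Nat.lt_or_ge (PySem.Chars.find l [l[j]]).toNat j with hlt | hge
      · exact hnone ⟨_, hlt, hkey⟩
      · exact hmin j (by omega) ((key j).mpr (List.getElem?_eq_getElem hj))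
    omega

-- ===== VERDICT (by name: the statement is the Claim_ definition above) =====
theorem obscure_phrase_spec : Claim_equal_obscure_phrase := by
  intro secret guessed _
  unfold Spec_obscure_phrase obscure_phrase obscure_phrase_alt
  congr 1
  rw [A_fold guessed.toList secret.toList [] [] (by simp), List.nil_append]
  apply List.ext_getElem
  · simp [specGo_length, PySem.List.length_enumerate]
  · intro j hj hj2
    have hjl : j < secret.toList.length := by simpa [specGo_length] using hj
    rw [specGo_getElem guessed.toList secret.toList [] j hjl, List.getElem_map,
        PySem.List.getElem_enumerate]
    have hfind : PySem.Str.find secret (String.ofList [secret.toList[j]])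
        = PySem.Chars.find secret.toList [secret.toList[j]] := by
      rw [PySem.Str.find_eq]; simp
    rw [hfind]
    have hiff := find_singleton_eq_iff secret.toList j hjl
    by_cases h1 : secret.toList[j] ∈ guessed.toList <;>
      by_cases h2 : secret.toList[j] ∈ secret.toList.take j <;>
      simp [h1, h2, zero_add] at hiff ⊢ <;> omega
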